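-- pv_equiv track=rewrite | github.com/viktor-grunwaldt/wdp | lista11/zad2.py | pnn
-- ===== SOURCE A (Python) =====
-- def pnn(word: str) -> str:
--     alfa = dict()
--     sol = []
--     for letter in word:
--         pos = alfa.get(letter)
--         if pos is None:
--             pos = len(alfa) + 1
--             alfa[letter] = pos
--
--         sol.append(pos)
--
--     return "-".join(map(str, sol))
-- ===== SOURCE B (Python) =====
-- def pnn(word: str) -> str:
--     # rank of a letter = number of distinct letters in the prefix of word
--     # up to and including the letter's first occurrence (a per-character
--     # closed form: no dict, no running state).
--     return "-".join(str(len(set(word[:word.find(c) + 1]))) for c in word)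
-- ===== Notes on version B (the rewrite author's own statement) =====
-- stated objective: alternative
-- what changed: A builds a rank dict incrementally in one stateful pass; B keeps no state at all and computes each letter's rank independently by the closed form len(set(word[:word.find(c)+1])) - the count of distinct letters up to that letter's first occurrence - trading O(n) for O(n^2).
import Mathlib
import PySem

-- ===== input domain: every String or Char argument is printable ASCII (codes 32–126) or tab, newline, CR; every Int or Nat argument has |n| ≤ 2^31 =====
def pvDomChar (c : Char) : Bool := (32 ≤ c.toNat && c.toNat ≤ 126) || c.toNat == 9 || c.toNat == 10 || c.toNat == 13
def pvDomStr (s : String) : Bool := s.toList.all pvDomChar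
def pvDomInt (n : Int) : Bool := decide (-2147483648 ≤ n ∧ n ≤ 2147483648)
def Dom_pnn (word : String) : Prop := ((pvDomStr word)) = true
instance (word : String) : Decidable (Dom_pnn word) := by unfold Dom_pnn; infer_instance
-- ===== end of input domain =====

-- B keeps no running state at all: instead of A's dict grown while emitting, it
-- computes each letter's rank independently as len(set(word[:word.find(c)+1]))
-- (distinct letters up to the letter's first occurrence); objective: alternative.


-- ===== PORT A =====
-- one loop step of A: look the letter up; if absent, assign it rank len(alfa)+1
def pnnStep (st : PySem.Dict Char Int × List Int) (letter : Char) : PySem.Dict Char Int × List Int :=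
  match st.1.get? letter with
  | some pos => (st.1, st.2 ++ [pos])
  | none =>
      let pos : Int := (st.1.size : Int) + 1
      (st.1.insert letter pos, st.2 ++ [pos])

def pnn (word : String) : String :=
  let st := word.toList.foldl pnnStep (PySem.Dict.empty, [])
  PySem.Str.join "-" (st.2.map PySem.Int.toStr)

-- ===== PORT B =====
-- str(len(set(word[:word.find(c) + 1]))) for each c in word, joined by "-"
def pnn_alt (word : String) : String :=
  PySem.Str.join "-" (word.toList.map (fun c =>
    PySem.Int.toStr
      (((PySem.Set.ofList
          (PySem.Str.slice word none (some (PySem.Str.find word (String.ofList [c]) + 1))).toList).length : Int))))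

-- ===== PRECONDITION & SPEC =====
def Spec_pnn (word : String) (out : String) : Prop := out = pnn_alt word
instance (word : String) (out : String) : Decidable (Spec_pnn word out) := by unfold Spec_pnn; infer_instance

-- ===== CLAIM (what is proved, stated in full; the proofs are below) =====
def Claim_equal_pnn : Prop := ∀ (word : String), Dom_pnn word → Spec_pnn word (pnn word)

-- ===== LEMMAS AND PROOFS =====

-- A's dict after seeing exactly the distinct letters s (in order): s[i] ↦ i+1,
-- written with a general enumeration start k so induction goes through.
def rnkDict (s : List Char) (k : Int) : PySem.Dict Char Int :=
  ⟨(PySem.List.enumerate s k).map (fun p => (p.2, p.1))⟩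

theorem get?_rnkDict_none (s : List Char) (k : Int) (c : Char) (hc : c ∉ s) :
    (rnkDict s k).get? c = none := by
  induction s generalizing k with
  | nil =>
      have h0 : rnkDict [] k = (PySem.Dict.empty : PySem.Dict Char Int) := rfl
      rw [h0, PySem.Dict.get?_empty]
  | cons x xs ih =>
      rw [rnkDict, PySem.List.enumerate_cons]
      simp only [List.map_cons]
      rw [PySem.Dict.get?_mk_cons]
      have hxc : (x == c) = false := beq_eq_false_iff_ne.mpr (fun h => hc (h ▸ List.mem_cons_self))
      rw [hxc]
      simp only [Bool.false_eq_true, if_false]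
      exact ih (k + 1) (fun h => hc (List.mem_cons_of_mem _ h))

theorem get?_rnkDict (s : List Char) (k : Int) (c : Char) (hnd : s.Nodup) (hc : c ∈ s) :
    (rnkDict s k).get? c = some ((s.idxOf c : Int) + k) := by
  induction s generalizing k with
  | nil => exact absurd hc List.not_mem_nil
  | cons x xs ih =>
      rcases List.nodup_cons.mp hnd with ⟨hx, hnd'⟩
      rw [rnkDict, PySem.List.enumerate_cons]
      simp only [List.map_cons]
      rw [PySem.Dict.get?_mk_cons]
      by_cases hcx : x = c
      · subst hcx
        simp [List.idxOf_cons_self]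
      · have hxcb : (x == c) = false := beq_eq_false_iff_ne.mpr hcx
        rw [hxcb]
        simp only [Bool.false_eq_true, if_false]
        have hm : c ∈ xs := by
          rcases List.mem_cons.mp hc with h | h
          · exact absurd h.symm hcx
          · exact h
        have hrec := ih (k + 1) hnd' hm
        rw [rnkDict] at hrec
        rw [hrec, List.idxOf_cons_ne (a := c) (b := x) xs hcx]
        push_cast
        ring_nf

theorem size_rnkDict (s : List Char) (k : Int) : (rnkDict s k).size = s.length := by
  simp [rnkDict, PySem.Dict.size, PySem.List.length_enumerate]

theorem enumerate_append_singleton (s : List Char) (c : Char) (k : Int) :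
    PySem.List.enumerate (s ++ [c]) k
      = PySem.List.enumerate s k ++ [((k + s.length : Int), c)] := by
  induction s generalizing k with
  | nil => simp [PySem.List.enumerate_cons, PySem.List.enumerate]
  | cons x xs ih =>
      simp [PySem.List.enumerate_cons, ih (k + 1)]
      ring_nf

theorem rnkDict_append (s : List Char) (c : Char) (hc : c ∉ s) :
    (rnkDict s 1).insert c ((s.length : Int) + 1) = rnkDict (s ++ [c]) 1 := by
  apply PySem.Dict.ext
  have hcont : (rnkDict s 1).contains c = false := by
    rw [PySem.Dict.contains_eq_isSome_get?, get?_rnkDict_none s 1 c hc]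
    rfl
  rw [PySem.Dict.items_insert_of_not_contains _ _ hcont]
  simp [rnkDict, enumerate_append_singleton, add_comm]

-- the rank of an already-seen letter does not change when new letters are appended
theorem idxOf_update (s : List Char) (rest : List Char) (c : Char) (hc : c ∈ s) :
    (PySem.Set.update s rest).idxOf c = s.idxOf c := by
  rw [PySem.Set.update_eq_append_filter]
  exact List.idxOf_append_of_mem hc

-- main invariant of A's loop
theorem pnn_loop (rest : List Char) :
    ∀ (s : List Char) (sol : List Int), s.Nodup →
    rest.foldl pnnStep (rnkDict s 1, sol)
      = (rnkDict (PySem.Set.update s rest) 1,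
         sol ++ rest.map (fun c => ((PySem.Set.update s rest).idxOf c : Int) + 1)) := by
  induction rest with
  | nil => intro s sol hnd; simp [PySem.Set.update_nil]
  | cons c rest' ih =>
      intro s sol hnd
      rw [List.foldl_cons, PySem.Set.update_cons]
      by_cases hc : c ∈ s
      · have hadd : PySem.Set.add s c = s := by
          simp [PySem.Set.add, hc]
        rw [hadd]
        have hstep : pnnStep (rnkDict s 1, sol) c
            = (rnkDict s 1, sol ++ [(s.idxOf c : Int) + 1]) := by
          simp [pnnStep, get?_rnkDict s 1 c hnd hc]
        rw [hstep, ih s _ hnd]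
        have hhead : ((PySem.Set.update s rest').idxOf c : Int) + 1 = (s.idxOf c : Int) + 1 := by
          rw [idxOf_update s rest' c hc]
        simp [hhead]
      · have hadd : PySem.Set.add s c = s ++ [c] := by
          simp [PySem.Set.add, hc]
        rw [hadd]
        have hstep : pnnStep (rnkDict s 1, sol) c
            = (rnkDict (s ++ [c]) 1, sol ++ [(s.length : Int) + 1]) := by
          simp only [pnnStep, get?_rnkDict_none s 1 c hc, size_rnkDict]
          rw [rnkDict_append s c hc]
        have hnd' : (s ++ [c]).Nodup :=
          List.Nodup.append hnd (List.nodup_singleton c) (List.disjoint_singleton.mpr hc)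
        rw [hstep, ih (s ++ [c]) _ hnd']
        have hcmem : c ∈ s ++ [c] := by simp
        have hhead : ((PySem.Set.update (s ++ [c]) rest').idxOf c : Int) + 1
            = (s.length : Int) + 1 := by
          rw [idxOf_update _ rest' c hcmem]
          simp [List.idxOf_append, hc]
        simp [hhead]

-- [c] is a prefix of xs iff xs starts with c
theorem singleton_prefix_iff (c : Char) (xs : List Char) :
    [c] <+: xs ↔ xs[0]? = some c := by
  cases xs with
  | nil => simp
  | cons a t => simp [List.cons_prefix_cons, eq_comm]

-- an index holding c is at or after the first occurrence
theorem idxOf_le_of_getElem? (l : List Char) (c : Char) :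
    ∀ (j : Nat), l[j]? = some c → l.idxOf c ≤ j := by
  induction l with
  | nil => intro j h; simp at h
  | cons x t ih =>
      intro j h
      cases j with
      | zero =>
          simp at h
          subst h
          simp [List.idxOf_cons_self]
      | succ j' =>
          simp only [List.getElem?_cons_succ] at h
          by_cases hx : x = c
          · subst hx; simp [List.idxOf_cons_self]
          · rw [List.idxOf_cons_ne (a := c) (b := x) t hx]
            exact Nat.succ_le_succ (ih j' h)

-- Python's word.find(c) for a letter actually in the word is the first index
theorem find_singleton (l : List Char) (c : Char) (hc : c ∈ l) :
    PySem.Chars.find l [c] = (l.idxOf c : Int) := by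
  have hinf : [c] <:+: l := by
    rcases List.append_of_mem hc with ⟨s, t, rfl⟩
    exact ⟨s, t, by simp⟩
  have hnn : 0 ≤ PySem.Chars.find l [c] := (PySem.Chars.find_nonneg_iff _ _).mpr hinf
  obtain ⟨hpre, hmin⟩ := PySem.Chars.find_spec (s := l) (sub := [c]) hnn
  set j := (PySem.Chars.find l [c]).toNat with hj
  have hgj : l[j]? = some c := by
    have := (singleton_prefix_iff c (l.drop j)).mp hpre
    simpa [List.getElem?_drop] using this
  have h1 : l.idxOf c ≤ j := idxOf_le_of_getElem? l c j hgj
  have hlt : l.idxOf c < l.length := List.idxOf_lt_length_of_mem hc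
  have h2 : j ≤ l.idxOf c := by
    by_contra hcon
    have hidxlt : l.idxOf c < j := by omega
    apply hmin (l.idxOf c) hidxlt
    rw [singleton_prefix_iff]
    simp [List.getElem?_drop, List.getElem?_eq_getElem hlt, List.getElem_idxOf]
  have : j = l.idxOf c := le_antisymm h2 h1
  omega

-- counting distinct letters in the prefix ending at c's first occurrence
-- yields exactly c's 1-based first-occurrence rank
theorem setlen_take (l : List Char) :
    ∀ (s : List Char) (c : Char), s.Nodup → c ∉ s → c ∈ l →
    (PySem.Set.update s (l.take (l.idxOf c + 1))).length
      = (PySem.Set.update s l).idxOf c + 1 := by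
  induction l with
  | nil => intro s c _ _ h; exact absurd h List.not_mem_nil
  | cons x t ih =>
      intro s c hnd hcs hc
      by_cases hcx : x = c
      · subst hcx
        rw [List.idxOf_cons_self]
        simp only [List.take_succ_cons, List.take_zero]
        have hadd : PySem.Set.add s x = s ++ [x] := by simp [PySem.Set.add, hcs]
        rw [PySem.Set.update_cons, hadd, PySem.Set.update_nil, PySem.Set.update_cons, hadd]
        have hm : x ∈ s ++ [x] := by simp
        rw [idxOf_update _ t x hm]
        simp [List.idxOf_append, hcs]
      · have hm : c ∈ t := by
          rcases List.mem_cons.mp hc with h | h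
          · exact absurd h.symm hcx
          · exact h
        rw [List.idxOf_cons_ne (a := c) (b := x) t hcx]
        rw [List.take_succ_cons, PySem.Set.update_cons, PySem.Set.update_cons]
        by_cases hx : x ∈ s
        · have hadd : PySem.Set.add s x = s := by simp [PySem.Set.add, hx]
          rw [hadd]
          exact ih s c hnd hcs hm
        · have hadd : PySem.Set.add s x = s ++ [x] := by simp [PySem.Set.add, hx]
          rw [hadd]
          have hnd' : (s ++ [x]).Nodup :=
            List.Nodup.append hnd (List.nodup_singleton x) (List.disjoint_singleton.mpr hx)
          have hcs' : c ∉ s ++ [x] := by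
            simp only [List.mem_append, List.mem_singleton]
            rintro (h | h)
            · exact hcs h
            · exact hcx h.symm
          exact ih (s ++ [x]) c hnd' hcs' hm

-- ===== VERDICT (by name: the statement is the Claim_ definition above) =====
set_option maxHeartbeats 1000000 in
theorem pnn_spec : Claim_equal_pnn := by
  intro word _
  unfold Spec_pnn pnn pnn_alt
  have hloop := pnn_loop word.toList [] [] List.nodup_nil
  have h0 : rnkDict [] 1 = (PySem.Dict.empty : PySem.Dict Char Int) := rfl
  rw [h0] at hloop
  rw [hloop]
  simp only [List.nil_append, List.map_map]
  refine congrArg (PySem.Str.join "-") (List.map_congr_left ?_)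
  intro c hcw
  have hfind : PySem.Str.find word (String.ofList [c]) = (word.toList.idxOf c : Int) := by
    simp only [PySem.Str.find_eq]
    rw [String.toList_ofList]
    exact find_singleton word.toList c hcw
  have hslice : (PySem.Str.slice word none
      (some (PySem.Str.find word (String.ofList [c]) + 1))).toList
      = word.toList.take (word.toList.idxOf c + 1) := by
    rw [hfind]
    have hcast : (word.toList.idxOf c : Int) + 1 = ((word.toList.idxOf c + 1 : Nat) : Int) := by
      push_cast; ring
    simp only [PySem.Str.toList_slice, PySem.Chars.slice_eq_listSlice]
    rw [hcast]
    exact PySem.List.slice_to_natCast _ _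
  have hlen : (PySem.Set.ofList (word.toList.take (word.toList.idxOf c + 1))).length
      = (PySem.Set.ofList word.toList).idxOf c + 1 := by
    have h := setlen_take word.toList [] c List.nodup_nil List.not_mem_nil hcw
    rw [PySem.Set.update_nil_left, PySem.Set.update_nil_left] at h
    exact h
  have hupd : PySem.Set.update ([] : List Char) word.toList = PySem.Set.ofList word.toList :=
    PySem.Set.update_nil_left _
  simp only [Function.comp, hupd, hslice, hlen]
  congr 1
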